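-- pv_equiv track=rewrite | github.com/yassermb/DLA-Mutation | Pre-training/4channels/pretraining_selfsupervised_classweights.py | get_cluster_id
-- ===== SOURCE A (Python) =====
-- def get_cluster_id(clusters, p1,p2):
--     p1_c_id = -1
--     p2_c_id = -1
--     for c_id, cluster in enumerate(clusters):
--         if p1.upper() in cluster:
--             p1_c_id = c_id
--             break
--     for c_id, cluster in enumerate(clusters):
--         if p2.upper() in cluster:
--             p2_c_id = c_id
--             break
--     return (p1_c_id, p2_c_id)
-- ===== SOURCE B (Python) =====
-- def get_cluster_id(clusters, p1, p2):
--     p1_c_id = -1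
--     p2_c_id = -1
--     for c_id, cluster in enumerate(clusters):
--         if p1_c_id == -1 and p1.upper() in cluster:
--             p1_c_id = c_id
--         if p2_c_id == -1 and p2.upper() in cluster:
--             p2_c_id = c_id
--         if p1_c_id != -1 and p2_c_id != -1:
--             break
--     return (p1_c_id, p2_c_id)
-- ===== Notes on version B (the rewrite author's own statement) =====
-- stated objective: simpler
-- what changed: The two separate enumerate scans are merged into one pass that tracks both indices and stops as soon as both are found.
import Mathlib
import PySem

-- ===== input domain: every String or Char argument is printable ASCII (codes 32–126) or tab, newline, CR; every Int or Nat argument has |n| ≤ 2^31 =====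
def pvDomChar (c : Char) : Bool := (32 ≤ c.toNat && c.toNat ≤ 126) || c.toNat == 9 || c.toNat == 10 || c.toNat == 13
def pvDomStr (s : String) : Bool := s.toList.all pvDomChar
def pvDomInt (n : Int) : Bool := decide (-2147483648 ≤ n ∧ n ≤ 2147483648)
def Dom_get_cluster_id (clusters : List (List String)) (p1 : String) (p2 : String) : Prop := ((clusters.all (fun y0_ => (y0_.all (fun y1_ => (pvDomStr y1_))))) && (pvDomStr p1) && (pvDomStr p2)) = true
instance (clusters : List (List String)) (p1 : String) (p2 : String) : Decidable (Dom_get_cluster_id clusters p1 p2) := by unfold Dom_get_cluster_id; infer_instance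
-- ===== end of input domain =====

-- B merges A's two enumerate scans into one pass that tracks both indices and stops when both are found; simpler single loop, same return value.

-- ===== PORT A =====
-- one enumerate scan with break: first index whose cluster contains t.upper(), else the initial -1
def pvScanA (cs : List (List String)) (i : Int) (t : String) : Int :=
  match cs with
  | [] => -1
  | c :: rest => if c.contains (PySem.Str.upper t) then i else pvScanA rest (i + 1) t

def get_cluster_id (clusters : List (List String)) (p1 : String) (p2 : String) : Int × Int :=
  (pvScanA clusters 0 p1, pvScanA clusters 0 p2)

-- ===== PORT B =====
-- single pass carrying both accumulators, early exit when both are set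
def pvLoopB (cs : List (List String)) (i : Int) (p1 p2 : String) (a b : Int) : Int × Int :=
  match cs with
  | [] => (a, b)
  | c :: rest =>
    let a' := if a == -1 && c.contains (PySem.Str.upper p1) then i else a
    let b' := if b == -1 && c.contains (PySem.Str.upper p2) then i else b
    if a' != -1 && b' != -1 then (a', b') else pvLoopB rest (i + 1) p1 p2 a' b'

def get_cluster_id_alt (clusters : List (List String)) (p1 : String) (p2 : String) : Int × Int :=
  pvLoopB clusters 0 p1 p2 (-1) (-1)

-- ===== PRECONDITION & SPEC =====
def Spec_get_cluster_id (clusters : List (List String)) (p1 : String) (p2 : String) (out : Int × Int) : Prop := out = get_cluster_id_alt clusters p1 p2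
instance (clusters : List (List String)) (p1 : String) (p2 : String) (out : Int × Int) : Decidable (Spec_get_cluster_id clusters p1 p2 out) := by unfold Spec_get_cluster_id; infer_instance

-- ===== CLAIM (what is proved, stated in full; the proofs are below) =====
def Claim_equal_get_cluster_id : Prop := ∀ (clusters : List (List String)) (p1 : String) (p2 : String), Dom_get_cluster_id clusters p1 p2 → Spec_get_cluster_id clusters p1 p2 (get_cluster_id clusters p1 p2)

-- ===== LEMMAS AND PROOFS =====
theorem pvLoopB_spec (cs : List (List String)) (p1 p2 : String) :
    ∀ (i a b : Int), 0 ≤ i → pvLoopB cs i p1 p2 a b =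
      ((if a = -1 then pvScanA cs i p1 else a), (if b = -1 then pvScanA cs i p2 else b)) := by
  induction cs with
  | nil =>
    intro i a b _
    simp only [pvLoopB, pvScanA]
    by_cases ha : a = -1 <;> by_cases hb : b = -1 <;> simp [ha, hb]
  | cons c rest ih =>
    intro i a b hi
    have hi1 : (0:Int) ≤ i + 1 := by omega
    have hne : i ≠ -1 := by omega
    simp only [pvLoopB, pvScanA]
    by_cases ha : a = -1 <;> by_cases hb : b = -1 <;>
      by_cases h1 : c.contains (PySem.Str.upper p1) <;>
      by_cases h2 : c.contains (PySem.Str.upper p2) <;>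
      simp only [ha, hb, h1, h2, if_true, if_false, Bool.and_self, reduceIte,
        beq_self_eq_true, bne, beq_iff_eq, if_pos, if_neg] <;>
      simp_all [ih _ a b hi1, ih _ (-1) b hi1, ih _ a (-1) hi1, ih _ (-1) (-1) hi1,
        pvLoopB, hne] <;> split_ifs <;> simp_all

-- ===== VERDICT (by name: the statement is the Claim_ definition above) =====
theorem get_cluster_id_spec : Claim_equal_get_cluster_id := by
  intro clusters p1 p2 _
  unfold Spec_get_cluster_id get_cluster_id get_cluster_id_alt
  rw [pvLoopB_spec _ _ _ _ _ _ le_rfl]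
  simp
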